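-- pv_equiv track=rewrite | github.com/stackhpc/ADVise | cardiff/perf_cpu_tables.py | get_generic_cpu_perf
-- ===== SOURCE A (Python) =====
-- def get_generic_cpu_perf(cpu_struct, cpu_type):
--     # Let's find in the cpu already exist in the list of known CPUs
--     for cpu_list in sorted(cpu_struct, reverse=True):
--         if cpu_list in cpu_type:
--             return cpu_struct[cpu_list]
--
--     # Unless, retry by shortening the string by one word
--     if len(cpu_type.split()) > 1:
--         shorten_cpu_type = cpu_type.rsplit(' ', 1)[0]
--         return get_generic_cpu_perf(cpu_struct, shorten_cpu_type)
--
--     return 0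
-- ===== SOURCE B (Python) =====
-- def get_generic_cpu_perf(cpu_struct, cpu_type):
--     # Iterative rewrite: while-loop that cuts the string at its last space
--     # instead of recursing through split()/rsplit().
--     keys = sorted(cpu_struct, reverse=True)
--     while True:
--         for key in keys:
--             if key in cpu_type:
--                 return cpu_struct[key]
--         cut = cpu_type.rfind(' ')
--         if cut == -1:
--             return 0
--         cpu_type = cpu_type[:cut]
-- ===== Notes on version B (the rewrite author's own statement) =====
-- stated objective: simpler
-- what changed: Replaces A's tail recursion through split()/rsplit() with a single while loop that cuts the string at its last space found by rfind, dropping split() and the word-count guard entirely; Pre_ excludes cpu_type whose segment before the first space has more than one split() word (tab/newline/CR separated), where rsplit(' ',1) cannot shorten the string and A recurses forever (RecursionError) unless a key match preempts it.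
-- outside the precondition, e.g. on get_generic_cpu_perf({'a': 5}, 'a\tb'): A returns 5, B returns 5; on get_generic_cpu_perf({}, 'a\tb'): A raises RecursionError, B returns 0
import Mathlib
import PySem

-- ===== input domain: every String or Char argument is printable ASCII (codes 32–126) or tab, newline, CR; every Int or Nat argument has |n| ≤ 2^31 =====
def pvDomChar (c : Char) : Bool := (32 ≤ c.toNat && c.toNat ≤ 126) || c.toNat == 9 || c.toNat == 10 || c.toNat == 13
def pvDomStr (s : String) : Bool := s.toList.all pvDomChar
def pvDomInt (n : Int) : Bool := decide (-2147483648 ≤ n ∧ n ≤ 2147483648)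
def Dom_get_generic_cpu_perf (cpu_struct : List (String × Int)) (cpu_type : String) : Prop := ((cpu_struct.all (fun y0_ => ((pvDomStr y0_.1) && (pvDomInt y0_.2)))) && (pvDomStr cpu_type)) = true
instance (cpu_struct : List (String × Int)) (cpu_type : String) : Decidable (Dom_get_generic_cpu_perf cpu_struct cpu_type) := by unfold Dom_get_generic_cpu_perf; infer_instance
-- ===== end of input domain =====

-- B replaces A's tail recursion through split()/rsplit() with a plain while loop that
-- cuts the string at its last space (rfind); objective: simpler (shorter, iterative, no split()).

-- ===== PORT A =====
-- the for-loop 'for cpu_list in keys: if cpu_list in cpu_type: return cpu_struct[cpu_list]'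
-- (shared by both Pythons verbatim): first matching key's value, none if no key matches
def pvFirstMatch (d : PySem.Dict String Int) (keys : List String) (t : List Char) : Option Int :=
  match keys with
  | [] => none
  | k :: rest =>
    if PySem.Chars.isIn k.toList t then some (d.getD k 0) else pvFirstMatch d rest t

def pvGoA (d : PySem.Dict String Int) (t : List Char) : Int :=
  match pvFirstMatch d (PySem.List.sorted d.keys (fun k => k) true) t with
  | some v => v
  | none =>
    if (PySem.Chars.split₀ t).length > 1 then
      -- cpu_type.rsplit(' ', 1)[0]: the part before the last space, the whole string if there is none (exact)
      let i := PySem.Chars.rfind t [' ']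
      let shorten := if i < 0 then t else t.take i.toNat
      -- totality guard only: when it fails Python's recursion never shrinks the string and diverges (outside Pre_)
      if h : shorten.length < t.length then pvGoA d shorten else 0
    else 0
termination_by t.length
decreasing_by exact h

def get_generic_cpu_perf (cpu_struct : List (String × Int)) (cpu_type : String) : Int :=
  pvGoA (PySem.Dict.ofList cpu_struct) cpu_type.toList

-- ===== PORT B =====
def pvGoB (keys : List String) (d : PySem.Dict String Int) (t : List Char) : Int :=
  match pvFirstMatch d keys t with
  | some v => v
  | none =>
    let cut := PySem.Chars.rfind t [' ']
    if cut = -1 then 0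
    else
      -- 'cpu_type = cpu_type[:cut]' and loop; the dependent bound is a totality guard
      -- (rfind of a nonempty needle is < length whenever it is ≠ -1, see pvRfindGo_spec below)
      if h : cut.toNat < t.length then pvGoB keys d (t.take cut.toNat) else 0
termination_by t.length
decreasing_by simp only [List.length_take]; omega

def get_generic_cpu_perf_alt (cpu_struct : List (String × Int)) (cpu_type : String) : Int :=
  let d := PySem.Dict.ofList cpu_struct
  pvGoB (PySem.List.sorted d.keys (fun k => k) true) d cpu_type.toList

-- ===== PRECONDITION & SPEC =====
-- Pre_ excludes cpu_type whose segment before the first space splits into more than one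
-- word (i.e. tab/newline/CR separate words there): rsplit(' ', 1) cannot shorten that
-- segment, so when A's recursion reaches it unmatched it recurses forever (RecursionError,
-- e.g. on ([], "a\tb")); inputs where a key match happens to preempt the divergence are
-- excluded too (see the cites).
def Pre_get_generic_cpu_perf (cpu_struct : List (String × Int)) (cpu_type : String) : Prop :=
  (PySem.Chars.split₀ (cpu_type.toList.takeWhile (fun c => !(c == ' ')))).length ≤ 1
instance (cpu_struct : List (String × Int)) (cpu_type : String) : Decidable (Pre_get_generic_cpu_perf cpu_struct cpu_type) := by unfold Pre_get_generic_cpu_perf; infer_instance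

def pvWitness_get_generic_cpu_perf : (List (String × Int)) × String :=
  ([("xeon", 100), ("atom", 5)], "intel xeon v2")

def Spec_get_generic_cpu_perf (cpu_struct : List (String × Int)) (cpu_type : String) (out : Int) : Prop := out = get_generic_cpu_perf_alt cpu_struct cpu_type
instance (cpu_struct : List (String × Int)) (cpu_type : String) (out : Int) : Decidable (Spec_get_generic_cpu_perf cpu_struct cpu_type out) := by unfold Spec_get_generic_cpu_perf; infer_instance

-- ===== CLAIM (what is proved, stated in full; the proofs are below) =====
def Claim_equal_get_generic_cpu_perf : Prop := ∀ (cpu_struct : List (String × Int)) (cpu_type : String), Dom_get_generic_cpu_perf cpu_struct cpu_type → Pre_get_generic_cpu_perf cpu_struct cpu_type → Spec_get_generic_cpu_perf cpu_struct cpu_type (get_generic_cpu_perf cpu_struct cpu_type)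

-- ===== LEMMAS AND PROOFS =====

theorem pvFirstMatch_eq_none {d : PySem.Dict String Int} {keys : List String} {t : List Char} :
    pvFirstMatch d keys t = none ↔ ∀ k ∈ keys, PySem.Chars.isIn k.toList t = false := by
  induction keys with
  | nil => simp [pvFirstMatch]
  | cons k rest ih =>
    by_cases h : PySem.Chars.isIn k.toList t
    · simp [pvFirstMatch, h]
    · simp [pvFirstMatch, h, ih]

-- substring matching is monotone under infixes
theorem pvIsIn_mono {sub u t : List Char} (hinf : u <:+: t)
    (h : PySem.Chars.isIn sub u = true) : PySem.Chars.isIn sub t = true := by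
  rw [PySem.Chars.isIn_iff_infix] at h ⊢
  exact h.trans hinf

-- rfind.go: a non-(-1) result is a valid hit position ≤ the start index
theorem pvRfindGo_spec (s sub : List Char) (n : Nat) (h : PySem.Chars.rfind.go s sub n ≠ -1) :
    ∃ j : Nat, PySem.Chars.rfind.go s sub n = (j : Int) ∧ j ≤ n ∧ sub.isPrefixOf (s.drop j) := by
  induction n with
  | zero =>
    simp only [PySem.Chars.rfind.go] at h ⊢
    split_ifs at h ⊢ with hp
    · exact ⟨0, by simp, le_refl 0, by simpa using hp⟩
    · exact absurd rfl h
  | succ j ih =>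
    simp only [PySem.Chars.rfind.go] at h ⊢
    split_ifs at h ⊢ with hp
    · exact ⟨j + 1, rfl, le_refl _, hp⟩
    · obtain ⟨m, hm, hle, hpre⟩ := ih h
      exact ⟨m, hm, Nat.le_succ_of_le hle, hpre⟩

-- rfind.go finds a hit at or below its start index
theorem pvRfindGo_hit (s sub : List Char) (n j : Nat) (hj : j ≤ n)
    (hp : sub.isPrefixOf (s.drop j)) : PySem.Chars.rfind.go s sub n ≠ -1 := by
  induction n with
  | zero =>
    interval_cases j
    simp only [PySem.Chars.rfind.go]
    simp at hp
    simp [hp]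
  | succ m ih =>
    simp only [PySem.Chars.rfind.go]
    split_ifs with h
    · omega
    · rcases Nat.lt_or_ge j (m+1) with hlt | hge
      · exact ih (by omega)
      · have : j = m + 1 := by omega
        subst this; exact absurd hp (by simpa using h)

-- the last-space position: a nonnegative index below the length, whenever t contains a space
theorem pvRfind_space (t : List Char) (hmem : ' ' ∈ t) :
    ∃ j : Nat, PySem.Chars.rfind t [' '] = (j : Int) ∧ j < t.length ∧
      [' '].isPrefixOf (t.drop j) = true := by
  obtain ⟨j, hjlen, hj⟩ := List.mem_iff_getElem.mp hmem
  have hpre : [' '].isPrefixOf (t.drop j) = true := by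
    have : t.drop j = ' ' :: t.drop (j+1) := by
      rw [List.drop_eq_getElem_cons hjlen, hj]
    simp [this]
  have hne := pvRfindGo_hit t [' '] t.length j (Nat.le_of_lt hjlen) hpre
  obtain ⟨m, hm, hle, hp⟩ := pvRfindGo_spec t [' '] t.length hne
  have hlt : m < t.length := by
    by_contra hge
    have : t.drop m = [] := List.drop_eq_nil_of_le (by omega)
    rw [this] at hp
    simp at hp
  exact ⟨m, hm, hlt, hp⟩





-- takeWhile up to a prefix cut at or after the first stop element is unchanged
theorem pvTW_take (t : List Char) (j : Nat) (hj : j < t.length) (hsp : t[j] = ' ') :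
    (t.take j).takeWhile (fun c => !(c == ' ')) = t.takeWhile (fun c => !(c == ' ')) := by
  induction t generalizing j with
  | nil => simp at hj
  | cons c rest ih =>
    cases j with
    | zero => simp at hsp; simp [hsp]
    | succ m =>
      by_cases hc : c = ' '
      · simp [hc]
      · simp only [List.take_succ_cons, List.takeWhile_cons]
        rw [ih m (by simpa using hj) (by simpa using hsp)]

theorem pvTW_self (t : List Char) (h : ' ' ∉ t) :
    t.takeWhile (fun c => !(c == ' ')) = t := by
  induction t with
  | nil => rfl
  | cons c rest ih =>
    simp only [List.mem_cons, not_or] at h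
    simp [List.takeWhile_cons, h.1, ih h.2, Ne.symm]

theorem pvGetElem_space (t : List Char) (j : Nat) (hj : j < t.length)
    (hp : [' '].isPrefixOf (t.drop j) = true) : t[j] = ' ' := by
  rw [List.drop_eq_getElem_cons hj] at hp
  rw [List.isPrefixOf_iff_prefix, List.cons_prefix_cons] at hp
  exact hp.1.symm

-- if no key matches, B's loop keeps cutting and returns 0
theorem pvGoB_zero (keys : List String) (d : PySem.Dict String Int) :
    ∀ t : List Char, (∀ k ∈ keys, PySem.Chars.isIn k.toList t = false) → pvGoB keys d t = 0 := by
  intro t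
  induction hn : t.length using Nat.strong_induction_on generalizing t with
  | _ n ih =>
  intro hnm
  rw [pvGoB]
  rw [pvFirstMatch_eq_none.mpr hnm]
  simp only
  split_ifs with h1 h2
  · rfl
  · apply ih ((t.take (PySem.Chars.rfind t [' ']).toNat).length) (by subst hn; simp; omega) _ rfl
    intro k hk
    by_contra hmt
    have := pvIsIn_mono (List.IsPrefix.isInfix (List.take_prefix _ _))
      (by simpa using hmt)
    rw [hnm k hk] at this
    exact absurd this (by simp)
  · rfl

-- ports agree on every string inside Pre_
theorem pvGoA_eq_pvGoB (d : PySem.Dict String Int) :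
    ∀ t : List Char,
      (PySem.Chars.split₀ (t.takeWhile (fun c => !(c == ' ')))).length ≤ 1 →
      pvGoA d t = pvGoB (PySem.List.sorted d.keys (fun k => k) true) d t := by
  intro t
  induction hn : t.length using Nat.strong_induction_on generalizing t with
  | _ n ih =>
  intro hpre
  rw [pvGoA, pvGoB]
  cases hm : pvFirstMatch d (PySem.List.sorted d.keys (fun k => k) true) t with
  | some v => rfl
  | none =>
  simp only
  by_cases hsplit : (PySem.Chars.split₀ t).length > 1
  · -- more than one word: t must contain a space (else Pre_ bounds split₀ t itself)
    have hsp : ' ' ∈ t := by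
      by_contra hns
      rw [pvTW_self t hns] at hpre
      omega
    obtain ⟨j, hj, hjlt, hjpre⟩ := pvRfind_space t hsp
    have hrec : ∀ u : List Char, u = t.take j → pvGoA d u = pvGoB (PySem.List.sorted d.keys (fun k => k) true) d u := by
      intro u hu
      apply ih u.length (by subst hu hn; simp; omega) u rfl
      subst hu
      rw [pvTW_take t j hjlt (pvGetElem_space t j hjlt hjpre)]
      exact hpre
    simp only [hsplit, if_true, hj]
    rw [dif_pos, if_neg (by omega), dif_pos (by simpa using hjlt)]
    · rw [if_neg (by omega)]
      simpa using hrec _ (by simp)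
    · rw [if_neg (by omega)]
      simp
      omega
  · -- at most one word: A stops with 0; B's extra cuts can never produce a new match
    rw [if_neg hsplit]
    have hnm : ∀ k ∈ (PySem.List.sorted d.keys (fun k => k) true), PySem.Chars.isIn k.toList t = false :=
      pvFirstMatch_eq_none.mp hm
    split_ifs with h1 h2
    · rfl
    · symm
      apply pvGoB_zero
      intro k hk
      by_contra hmt
      have := pvIsIn_mono (List.IsPrefix.isInfix (List.take_prefix _ _))
        (by simpa using hmt)
      rw [hnm k hk] at this
      exact absurd this (by simp)
    · rfl

-- ===== VERDICT (by name: the statement is the Claim_ definition above) =====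
theorem get_generic_cpu_perf_spec : Claim_equal_get_generic_cpu_perf := by
  intro cpu_struct cpu_type hdom hpre
  unfold Spec_get_generic_cpu_perf get_generic_cpu_perf get_generic_cpu_perf_alt
  exact pvGoA_eq_pvGoB _ _ hpre
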